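-- pv_equiv track=rewrite | github.com/Jerjerry/TEST | app.py | mirror_pair
-- ===== SOURCE A (Python) =====
-- from typing import List, Dict, Tuple, Any, Set, Optional
--
-- def mirror_pair(stations_to_pair: List[int]) -> List[str]:
--     sorted_stations: List[int] = sorted(list(set(stations_to_pair)))
--     pairs: List[str] = []
--     n: int = len(sorted_stations)
--     for i in range(n // 2):
--         pairs.append(f"{sorted_stations[i]}-{sorted_stations[n - 1 - i]}")
--     if n % 2 != 0:
--         middle_index: int = n // 2
--         pairs.append(f"{sorted_stations[middle_index]}-{sorted_stations[middle_index]}")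
--     return pairs
-- ===== SOURCE B (Python) =====
-- def mirror_pair(stations_to_pair):
--     highs = sorted(set(stations_to_pair))  # stack: pop() yields the largest remaining
--     lows = highs[::-1]                     # stack: pop() yields the smallest remaining
--     pairs = []
--     remaining = len(highs)
--     while remaining > 0:
--         pairs.append(f"{lows.pop()}-{highs.pop()}")
--         remaining -= 2
--     return pairs
-- ===== Notes on version B (the rewrite author's own statement) =====
-- stated objective: alternative
-- what changed: Replaces the range(n//2) index loop plus the separate odd-length middle branch by a two-stack consumption: the sorted unique list and its reverse are popped in lockstep while a count of unconsumed elements (decremented by 2 per pair) stays positive, so no index arithmetic and no parity branch; the middle element of an odd list pairs with itself automatically.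
import Mathlib
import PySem

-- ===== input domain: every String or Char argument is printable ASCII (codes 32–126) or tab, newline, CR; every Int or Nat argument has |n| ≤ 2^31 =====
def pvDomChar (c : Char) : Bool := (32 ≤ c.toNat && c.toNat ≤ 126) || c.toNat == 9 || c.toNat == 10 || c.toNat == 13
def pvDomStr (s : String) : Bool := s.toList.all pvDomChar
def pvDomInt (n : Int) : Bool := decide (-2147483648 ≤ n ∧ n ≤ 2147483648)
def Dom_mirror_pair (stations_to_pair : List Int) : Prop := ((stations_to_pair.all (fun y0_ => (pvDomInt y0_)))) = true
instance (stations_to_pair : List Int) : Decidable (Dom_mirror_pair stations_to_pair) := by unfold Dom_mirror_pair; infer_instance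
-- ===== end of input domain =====

-- B replaces the index loop plus the separate odd-length middle branch by two stacks
-- (the sorted list and its reverse) popped in lockstep until the element count runs out;
-- the middle element of an odd list pairs with itself automatically (alternative).

-- ===== PORT A =====
def mirror_pair (stations_to_pair : List Int) : List String :=
  let sorted_stations : List Int :=
    PySem.List.sorted (PySem.Set.ofList stations_to_pair) (fun x => x) false
  let n : Int := PySem.List.len sorted_stations
  let pairs : List String :=
    (PySem.List.pyRange 0 (PySem.Int.floordiv n 2) 1).foldl
      (fun acc i =>
        acc ++ [PySem.Int.toStr (PySem.List.pyGetD sorted_stations i 0) ++ "-" ++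
                PySem.Int.toStr (PySem.List.pyGetD sorted_stations (n - 1 - i) 0)]) []
  if PySem.Int.mod n 2 ≠ 0 then
    let middle_index : Int := PySem.Int.floordiv n 2
    pairs ++ [PySem.Int.toStr (PySem.List.pyGetD sorted_stations middle_index 0) ++ "-" ++
              PySem.Int.toStr (PySem.List.pyGetD sorted_stations middle_index 0)]
  else pairs

-- ===== PORT B =====
-- the while loop of Source B: pop one element from each stack per iteration until the count runs out;
-- the `| _, _ => pairs` arm is where Python's list.pop would raise IndexError — proved unreachable below
def pvLoop (lows highs : List Int) (remaining : Int) (pairs : List String) : List String :=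
  if remaining > 0 then
    match PySem.List.pop? lows, PySem.List.pop? highs with
    | some (a, lows'), some (b, highs') =>
        pvLoop lows' highs' (remaining - 2) (pairs ++ [PySem.Int.toStr a ++ "-" ++ PySem.Int.toStr b])
    | _, _ => pairs
  else pairs
termination_by remaining.toNat
decreasing_by omega

def mirror_pair_alt (stations_to_pair : List Int) : List String :=
  let highs : List Int :=
    PySem.List.sorted (PySem.Set.ofList stations_to_pair) (fun x => x) false
  let lows : List Int := (PySem.List.slice? highs none none (-1)).getD []   -- highs[::-1]
  pvLoop lows highs (PySem.List.len highs) []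

-- ===== PRECONDITION & SPEC =====
def Spec_mirror_pair (stations_to_pair : List Int) (out : List String) : Prop := out = mirror_pair_alt stations_to_pair
instance (stations_to_pair : List Int) (out : List String) : Decidable (Spec_mirror_pair stations_to_pair out) := by unfold Spec_mirror_pair; infer_instance

-- ===== CLAIM (what is proved, stated in full; the proofs are below) =====
def Claim_equal_mirror_pair : Prop := ∀ (stations_to_pair : List Int), Dom_mirror_pair stations_to_pair → Spec_mirror_pair stations_to_pair (mirror_pair stations_to_pair)

-- ===== LEMMAS AND PROOFS =====

/-- canonical form: the first (n+1)/2 mirror-pair strings, by index. -/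
def pvCanon (s : List Int) : List String :=
  (List.range ((s.length + 1) / 2)).map
    (fun k => PySem.Int.toStr (s.getD k 0) ++ "-" ++ PySem.Int.toStr (s.getD (s.length - 1 - k) 0))

lemma pvA_core (s : List Int) :
    (let n : Int := PySem.List.len s
     let pairs : List String :=
       (PySem.List.pyRange 0 (PySem.Int.floordiv n 2) 1).foldl
         (fun acc i =>
           acc ++ [PySem.Int.toStr (PySem.List.pyGetD s i 0) ++ "-" ++
                   PySem.Int.toStr (PySem.List.pyGetD s (n - 1 - i) 0)]) []
     if PySem.Int.mod n 2 ≠ 0 then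
       let middle_index : Int := PySem.Int.floordiv n 2
       pairs ++ [PySem.Int.toStr (PySem.List.pyGetD s middle_index 0) ++ "-" ++
                 PySem.Int.toStr (PySem.List.pyGetD s middle_index 0)]
     else pairs) = pvCanon s := by
  have hd : PySem.Int.floordiv ((s.length : Int)) 2 = ((s.length / 2 : Nat) : Int) := by
    exact_mod_cast PySem.Int.floordiv_natCast s.length 2
  have hm : PySem.Int.mod ((s.length : Int)) 2 = ((s.length % 2 : Nat) : Int) := by
    exact_mod_cast PySem.Int.mod_natCast s.length 2
  simp only [PySem.List.len_eq, hd, hm, PySem.List.foldl_append_singleton_eq_map,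
    PySem.List.pyRange_zero_natCast, List.map_map, List.nil_append]
  have hbody : ∀ k ∈ List.range (s.length / 2),
      ((fun i => PySem.Int.toStr (PySem.List.pyGetD s i 0) ++ "-" ++
          PySem.Int.toStr (PySem.List.pyGetD s ((s.length : Int) - 1 - i) 0)) ∘ (fun k : Nat => (k : Int))) k
      = PySem.Int.toStr (s.getD k 0) ++ "-" ++ PySem.Int.toStr (s.getD (s.length - 1 - k) 0) := by
    intro k hk
    rw [List.mem_range] at hk
    have hcast : (s.length : Int) - 1 - (k : Int) = ((s.length - 1 - k : Nat) : Int) := by omega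
    simp [hcast, PySem.List.pyGetD_natCast]
  rw [List.map_congr_left hbody]
  by_cases hpar : s.length % 2 = 0
  · have : (s.length + 1) / 2 = s.length / 2 := by omega
    simp [pvCanon, hpar, this]
  · have h1 : s.length % 2 = 1 := by omega
    have h2 : (s.length + 1) / 2 = s.length / 2 + 1 := by omega
    have h3 : s.length - 1 - s.length / 2 = s.length / 2 := by omega
    simp only [h1, pvCanon, h2, List.range_succ, List.map_append, List.map_cons,
      List.map_nil, PySem.List.pyGetD_natCast]
    simp [h3]

lemma pv_pop_eq (l : List Int) (h : l ≠ []) :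
    PySem.List.pop? l = some (l.getLast h, l.dropLast) := by
  conv_lhs => rw [← List.dropLast_append_getLast h]
  rw [PySem.List.pop?_last]

lemma pvLoop_inv (s : List Int) : ∀ (m k : Nat) (acc : List String),
    (s.length + 1) / 2 - k ≤ m →
    pvLoop ((s.drop k).reverse) (s.take (s.length - k)) ((s.length : Int) - 2 * k) acc
      = acc ++ ((List.range ((s.length + 1) / 2)).drop k).map
          (fun j => PySem.Int.toStr (s.getD j 0) ++ "-" ++
                    PySem.Int.toStr (s.getD (s.length - 1 - j) 0)) := by
  intro m
  induction m with
  | zero =>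
    intro k acc hm
    have hk : (s.length + 1) / 2 ≤ k := by omega
    rw [pvLoop, if_neg (by omega)]
    simp [List.drop_eq_nil_of_le, hk]
  | succ m ih =>
    intro k acc hm
    by_cases hk : (s.length + 1) / 2 ≤ k
    · rw [pvLoop, if_neg (by omega)]
      simp [List.drop_eq_nil_of_le, hk]
    · have hklt : k < (s.length + 1) / 2 := by omega
      have hkn : k < s.length := by omega
      have h2k : 2 * k + 1 ≤ s.length := by omega
      have hpos : (0 : Int) < (s.length : Int) - 2 * k := by omega
      have hne1 : (s.drop k).reverse ≠ [] := by
        simp [List.drop_eq_nil_iff]; omega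
      have hne2 : s.take (s.length - k) ≠ [] := by
        simp only [ne_eq, List.take_eq_nil_iff, not_or]
        exact ⟨by omega, fun h => by simp [h] at hkn⟩
      have ha : (s.drop k).reverse.getLast hne1 = s[k] := by
        rw [List.getLast_reverse, List.head_drop]
      have ha' : (s.drop k).reverse.dropLast = (s.drop (k + 1)).reverse := by
        rw [List.dropLast_reverse, List.tail_drop]
      have hb : (s.take (s.length - k)).getLast hne2 = s[s.length - 1 - k] := by
        rw [List.getLast_eq_getElem, List.getElem_take]
        congr 1
        simp [List.length_take]
        omega
      have hb' : (s.take (s.length - k)).dropLast = s.take (s.length - (k + 1)) := by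
        rw [List.dropLast_eq_take, List.take_take]
        congr 1
        simp [List.length_take]
        omega
      rw [pvLoop, if_pos hpos, pv_pop_eq _ hne1, pv_pop_eq _ hne2, ha, ha', hb, hb']
      show pvLoop ((s.drop (k + 1)).reverse) (s.take (s.length - (k + 1)))
          ((s.length : Int) - 2 * (k : Int) - 2)
          (acc ++ [PySem.Int.toStr (s[k]'hkn) ++ "-" ++
                   PySem.Int.toStr (s[s.length - 1 - k]'(by omega))]) = _
      have hrem : (s.length : Int) - 2 * (k : Int) - 2 = (s.length : Int) - 2 * ((k + 1 : Nat) : Int) := by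
        push_cast; ring
      rw [hrem, ih (k + 1) _ (by omega)]
      have hdrop : (List.range ((s.length + 1) / 2)).drop k
          = k :: (List.range ((s.length + 1) / 2)).drop (k + 1) := by
        rw [List.drop_eq_getElem_cons (show k < (List.range ((s.length + 1) / 2)).length by
          simpa using hklt), List.getElem_range]
      rw [hdrop, List.map_cons, List.append_assoc, List.singleton_append]
      simp [List.getElem?_eq_getElem hkn,
        List.getElem?_eq_getElem (show s.length - 1 - k < s.length by omega)]

-- ===== VERDICT (by name: the statement is the Claim_ definition above) =====
theorem mirror_pair_spec : Claim_equal_mirror_pair := by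
  intro xs _
  unfold Spec_mirror_pair mirror_pair mirror_pair_alt
  rw [pvA_core]
  simp only [PySem.List.slice?_none_none_neg_one, Option.getD_some, PySem.List.len_eq]
  have h0 := pvLoop_inv (PySem.List.sorted (PySem.Set.ofList xs) (fun x => x) false)
    ((PySem.List.sorted (PySem.Set.ofList xs) (fun x => x) false).length + 1) 0 []
  simp only [List.drop_zero, Nat.sub_zero, List.take_length, Nat.cast_zero, mul_zero, sub_zero] at h0
  rw [h0 (by omega)]
  simp [pvCanon]
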